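-- pv_equiv track=rewrite | github.com/abdul-muqeet715/angular | atm_optimizer_enh1.py | all_nonempty_submasks
-- ===== SOURCE A (Python) =====
-- import itertools
-- from typing import List, Dict, Tuple, Optional
--
-- def bits_of_mask(mask: int) -> List[int]:
--     return [i for i in range(7) if ((mask >> (6-i)) & 1)]
--
-- def mask_from_bits(bits: List[int]) -> int:
--     m = 0
--     for i in bits:
--         m |= (1 << (6 - i))
--     return m
--
-- def all_nonempty_submasks(mask: int, max_bits: Optional[int] = None) -> List[int]:
--     bits = bits_of_mask(mask)
--     subs = []
--     max_r = len(bits) if max_bits is None else min(len(bits), max_bits)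
--     for r in range(1, max_r+1):
--         for comb in itertools.combinations(bits, r):
--             subs.append(mask_from_bits(list(comb)))
--     return sorted(set(subs))
-- ===== SOURCE B (Python) =====
-- def all_nonempty_submasks(mask, max_bits=None):
--     m = mask & 0x7F
--     cap = bin(m).count("1") if max_bits is None else max_bits
--     res = []
--     sub = m
--     while sub:
--         if bin(sub).count("1") <= cap:
--             res.append(sub)
--         sub = (sub - 1) & m
--     return sorted(res)
-- ===== Notes on version B (the rewrite author's own statement) =====
-- stated objective: simpler
-- what changed: B enumerates the submasks of mask & 0x7F directly with the standard sub = (sub-1) & m bit trick, filtering by popcount against the cap, instead of generating itertools.combinations of set-bit positions for every size r, rebuilding masks, deduplicating through a set and sorting.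
import Mathlib
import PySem

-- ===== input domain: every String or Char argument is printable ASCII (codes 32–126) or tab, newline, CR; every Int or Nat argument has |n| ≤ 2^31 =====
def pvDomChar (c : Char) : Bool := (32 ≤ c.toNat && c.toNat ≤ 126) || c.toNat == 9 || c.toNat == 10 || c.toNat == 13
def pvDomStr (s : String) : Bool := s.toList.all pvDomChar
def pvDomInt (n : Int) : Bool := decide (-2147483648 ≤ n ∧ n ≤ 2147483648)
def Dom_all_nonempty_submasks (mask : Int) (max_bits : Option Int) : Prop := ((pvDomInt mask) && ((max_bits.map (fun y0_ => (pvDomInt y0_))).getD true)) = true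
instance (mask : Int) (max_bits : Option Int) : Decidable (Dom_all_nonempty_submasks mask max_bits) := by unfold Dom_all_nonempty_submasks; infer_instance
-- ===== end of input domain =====

-- B replaces per-size itertools.combinations + set + sort by a direct (sub-1)&m submask walk with a popcount cap; simpler, same values.

-- ===== PORT A =====
def bits_of_mask (mask : Int) : List Int :=
  (PySem.List.pyRange 0 7 1).filter (fun i => PySem.Int.band (mask >>> (6 - i).toNat) 1 != 0)

def mask_from_bits (bits : List Int) : Int :=
  bits.foldl (fun m i => PySem.Int.bor m ((1 : Int) <<< (6 - i).toNat)) 0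

def all_nonempty_submasks (mask : Int) (max_bits : Option Int) : List Int :=
  let bits := bits_of_mask mask
  let max_r : Int := match max_bits with
    | none => (bits.length : Int)
    | some mb => min (bits.length : Int) mb
  let subs := (PySem.List.pyRange 1 (max_r + 1) 1).foldl
    (fun subs r => (PySem.List.combinations bits r.toNat).foldl
      (fun subs comb => subs ++ [mask_from_bits comb]) subs) []
  PySem.List.sorted (PySem.Set.ofList subs) (fun x => x) false

-- ===== PORT B =====
-- the while loop of Source B; fuel 128 only makes totality explicit (sub < 128 strictly decreases)
def pvSubLoop (m : Nat) (cap : Int) : Nat → Nat → List Int → List Int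
  | 0, _, res => res
  | _, 0, res => res
  | fuel + 1, sub, res =>
    pvSubLoop m cap fuel ((sub - 1) &&& m)
      (if (PySem.Int.bitCount (sub : Int) : Int) ≤ cap then res ++ [(sub : Int)] else res)

def all_nonempty_submasks_alt (mask : Int) (max_bits : Option Int) : List Int :=
  let m : Nat := (PySem.Int.band mask 127).toNat
  -- bin(m).count("1") on the nonnegative m is exactly m.bit_count() = PySem.Int.bitCount
  let cap : Int := match max_bits with
    | none => (PySem.Int.bitCount (m : Int) : Int)
    | some c => c
  PySem.List.sorted (pvSubLoop m cap 128 m []) (fun x => x) false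

-- ===== PRECONDITION & SPEC =====
def Spec_all_nonempty_submasks (mask : Int) (max_bits : Option Int) (out : List Int) : Prop := out = all_nonempty_submasks_alt mask max_bits
instance (mask : Int) (max_bits : Option Int) (out : List Int) : Decidable (Spec_all_nonempty_submasks mask max_bits out) := by unfold Spec_all_nonempty_submasks; infer_instance

-- ===== CLAIM (what is proved, stated in full; the proofs are below) =====
def Claim_equal_all_nonempty_submasks : Prop := ∀ (mask : Int) (max_bits : Option Int), Dom_all_nonempty_submasks mask max_bits → Spec_all_nonempty_submasks mask max_bits (all_nonempty_submasks mask max_bits)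

-- ===== LEMMAS AND PROOFS =====

-- n &&& 127 = n % 128 on Nat
lemma pv_nat_and127 (n : Nat) : n &&& 127 = n % 128 := by
  apply Nat.eq_of_testBit_eq
  intro i
  rw [Nat.testBit_and, show (128:Nat) = 2^7 from rfl, Nat.testBit_mod_two_pow,
      show (127:Nat) = 2^7 - 1 from rfl, Nat.testBit_two_pow_sub_one]
  rw [Bool.and_comm]

-- Python mask & 0x7F is mask % 128
lemma pv_band127 (m : Int) : PySem.Int.band m 127 = m % 128 := by
  unfold PySem.Int.band
  split
  · rw [if_pos (by norm_num), show ((127:Int).toNat = 127) from rfl, pv_nat_and127]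
    omega
  · rw [if_pos (by norm_num), show ((127:Int).toNat = 127) from rfl, Nat.land_comm, pv_nat_and127]
    omega

lemma pv_mod2 (a : Int) : PySem.Int.mod a 2 = a % 2 := by
  simp [PySem.Int.mod, Int.fmod_eq_emod]

-- bit parity of m / 2^k only depends on m % 128 for k ≤ 6
lemma pv_parity_aux (c d : Int) (hc : c ≠ 0) (hcd : (128:Int) = 2 * c * d) (m : Int) :
    (m % 128 / c) % 2 = (m / c) % 2 := by
  conv_rhs => rw [← Int.ediv_add_emod m 128]
  rw [hcd, show 2 * c * d * (m / (2 * c * d)) + m % (2 * c * d)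
      = m % (2*c*d) + (2 * d * (m / (2*c*d))) * c by ring]
  rw [Int.add_mul_ediv_right _ _ hc]
  rw [show m % (2*c*d) / c + 2 * d * (m / (2*c*d)) = m % (2*c*d) / c + 2 * (d * (m / (2*c*d))) by ring]
  generalize m % (2*c*d) / c = x
  generalize d * (m / (2*c*d)) = y
  omega

lemma pv_shift_parity (m : Int) (k : Nat) (hk : k ≤ 6) :
    PySem.Int.band ((m % 128) >>> k) 1 = PySem.Int.band (m >>> k) 1 := by
  rw [PySem.Int.band_one, PySem.Int.band_one, pv_mod2, pv_mod2,
      Int.shiftRight_eq_div_pow, Int.shiftRight_eq_div_pow]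
  interval_cases k <;> [exact pv_parity_aux 1 64 (by norm_num) (by norm_num) m;
    exact pv_parity_aux 2 32 (by norm_num) (by norm_num) m;
    exact pv_parity_aux 4 16 (by norm_num) (by norm_num) m;
    exact pv_parity_aux 8 8 (by norm_num) (by norm_num) m;
    exact pv_parity_aux 16 4 (by norm_num) (by norm_num) m;
    exact pv_parity_aux 32 2 (by norm_num) (by norm_num) m;
    exact pv_parity_aux 64 1 (by norm_num) (by norm_num) m]

lemma pv_bits_reduce (m : Int) : bits_of_mask m = bits_of_mask (m % 128) := by
  unfold bits_of_mask
  refine (List.filter_congr ?_).symm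
  intro i hi
  have hmem := (PySem.List.mem_pyRange_one).mp hi
  have h := pv_shift_parity m (6 - i).toNat (by omega)
  rw [h]

lemma pv_A_mask_reduce (mask : Int) (mb : Option Int) :
    all_nonempty_submasks mask mb = all_nonempty_submasks (mask % 128) mb := by
  unfold all_nonempty_submasks
  rw [pv_bits_reduce]

lemma pv_B_mask_reduce (mask : Int) (mb : Option Int) :
    all_nonempty_submasks_alt mask mb = all_nonempty_submasks_alt (mask % 128) mb := by
  unfold all_nonempty_submasks_alt
  rw [pv_band127, pv_band127, Int.emod_emod_of_dvd _ dvd_rfl]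

lemma pv_len_bits (mask : Int) : (bits_of_mask mask).length ≤ 7 := by
  unfold bits_of_mask
  exact le_trans (List.length_filter_le _ _) (by decide)

-- A's result only depends on max_bits through its clamp to [0, 7]
lemma pv_A_cap (mask c : Int) :
    all_nonempty_submasks mask (some c) = all_nonempty_submasks mask (some (min (max c 0) 7)) := by
  have hlen := pv_len_bits mask
  simp only [all_nonempty_submasks]
  by_cases hc : c ≤ 0
  · rw [PySem.List.pyRange_one_eq_nil (a := 1)
        (b := min (↑(bits_of_mask mask).length) c + 1) (by omega),
      PySem.List.pyRange_one_eq_nil (a := 1)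
        (b := min (↑(bits_of_mask mask).length) (min (max c 0) 7) + 1) (by omega)]
  · rw [show min (↑(bits_of_mask mask).length) (min (max c 0) 7) = min (↑(bits_of_mask mask).length) c by
      have h7 : ((bits_of_mask mask).length : Int) ≤ 7 := by exact_mod_cast hlen
      omega]

lemma pv_bc_bounds (n : Nat) (h : n < 128) (h1 : 1 ≤ n) :
    1 ≤ PySem.Int.bitCount (n : Int) ∧ PySem.Int.bitCount (n : Int) ≤ 7 :=
  (by decide : ∀ f : Fin 128, 1 ≤ f.val →
    1 ≤ PySem.Int.bitCount (f.val : Int) ∧ PySem.Int.bitCount (f.val : Int) ≤ 7) ⟨n, h⟩ h1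

lemma pv_loop_cap (m : Nat) (cap : Int) :
    ∀ (fuel sub : Nat) (res : List Int), sub ≤ 127 →
      pvSubLoop m cap fuel sub res = pvSubLoop m (min (max cap 0) 7) fuel sub res := by
  intro fuel
  induction fuel with
  | zero => intro sub res _; rfl
  | succ f ih =>
    intro sub res hsub
    match sub with
    | 0 => rfl
    | s + 1 =>
      simp only [pvSubLoop]
      have hb := pv_bc_bounds (s + 1) (by omega) (by omega)
      have hnext : (s + 1 - 1) &&& m ≤ 127 := by
        have := Nat.and_le_left (n := s + 1 - 1) (m := m); omega
      by_cases hcnd : (PySem.Int.bitCount ((s + 1 : Nat) : Int) : Int) ≤ cap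
      · rw [if_pos hcnd, if_pos (by omega)]
        exact ih _ _ hnext
      · rw [if_neg hcnd, if_neg (by omega)]
        exact ih _ _ hnext

lemma pv_B_cap (mask c : Int) :
    all_nonempty_submasks_alt mask (some c) = all_nonempty_submasks_alt mask (some (min (max c 0) 7)) := by
  simp only [all_nonempty_submasks_alt]
  have hm : (PySem.Int.band mask 127).toNat ≤ 127 := by
    rw [pv_band127]; omega
  rw [pv_loop_cap _ c 128 _ _ hm]

set_option maxRecDepth 100000 in
set_option maxHeartbeats 4000000 in
lemma pv_finite_check :
    ((List.range 128).all (fun r =>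
      (decide (all_nonempty_submasks r none = all_nonempty_submasks_alt r none)) &&
      ((List.range 8).all (fun c =>
        decide (all_nonempty_submasks r (some c) = all_nonempty_submasks_alt r (some c)))))) = true := by
  decide

lemma pv_agree (r : Nat) (hr : r < 128) :
    (all_nonempty_submasks (r : Int) none = all_nonempty_submasks_alt (r : Int) none) ∧
    ∀ c : Nat, c < 8 →
      all_nonempty_submasks (r : Int) (some (c : Int)) = all_nonempty_submasks_alt (r : Int) (some (c : Int)) := by
  have h := pv_finite_check
  rw [List.all_eq_true] at h
  have h1 := h r (List.mem_range.mpr hr)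
  simp only [Bool.and_eq_true, List.all_eq_true] at h1
  obtain ⟨ha, hb⟩ := h1
  refine ⟨of_decide_eq_true ha, fun c hc => of_decide_eq_true (hb c (List.mem_range.mpr hc))⟩

-- ===== VERDICT (by name: the statement is the Claim_ definition above) =====
theorem all_nonempty_submasks_spec : Claim_equal_all_nonempty_submasks := by
  intro mask mb _h
  unfold Spec_all_nonempty_submasks
  obtain ⟨r, hr, hrlt⟩ : ∃ r : Nat, (mask % 128 : Int) = (r : Int) ∧ r < 128 :=
    ⟨(mask % 128).toNat, by omega, by omega⟩
  cases mb with
  | none =>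
    rw [pv_A_mask_reduce mask none, pv_B_mask_reduce mask none, hr]
    exact (pv_agree r hrlt).1
  | some c =>
    rw [pv_A_cap mask c, pv_B_cap mask c, pv_A_mask_reduce, pv_B_mask_reduce, hr]
    obtain ⟨c', hc', hclt⟩ : ∃ c' : Nat, min (max c 0) 7 = (c' : Int) ∧ c' < 8 :=
      ⟨(min (max c 0) 7).toNat, by omega, by omega⟩
    rw [hc']
    exact (pv_agree r hrlt).2 c' hclt
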